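-- pv_equiv track=rewrite | github.com/Brandt-moreThan4/Misc_Code | WebScraping/NLP/markov_model.py | build_word_dictionary
-- ===== SOURCE A (Python) =====
-- def build_word_dictionary(text):
--     # Remove newlines and quotes. should i remove other things?
--     text = text.replace('\n', ' ')
--     text = text.replace('"', '')
--     text = text.upper()
--
--     # Make sure punctuation is treated as its own word
--     punctuation = [',', '.', ',', ';', ':']
--     for symbol in punctuation:
--         text = text.replace(symbol, f' {symbol} ')
--
--     words = text.split(' ')
--     words = [word for word in words if word != '']
--
--     word_dict = {}  # Dictionary of dictionaries
--     for i in range(1, len(words)):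
--         if words[i - 1] not in word_dict:
--             word_dict[words[i - 1]] = {}
--         if words[i] not in word_dict[words[i - 1]]:
--             word_dict[words[i - 1]][words[i]] = 0
--         word_dict[words[i - 1]][words[i]] += 1
--
--     return word_dict
-- ===== SOURCE B (Python) =====
-- def _count(items):
--     counts = {}
--     for x in items:
--         counts[x] = counts.get(x, 0) + 1
--     return counts
--
--
-- def build_word_dictionary(text):
--     # Normalization written as one chained expression; the ',' substitution is
--     # applied twice because the original's punctuation list repeats ',' (the
--     # repetition only adds extra spaces, which the split below discards).
--     cleaned = (text.replace('\n', ' ').replace('"', '').upper()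
--                .replace(',', ' , ').replace('.', ' . ').replace(',', ' , ')
--                .replace(';', ' ; ').replace(':', ' : '))
--     words = [w for w in cleaned.split(' ') if w != '']
--
--     # Pass 1: group each word's successors in order of appearance
--     succ = {}
--     for prev, nxt in zip(words, words[1:]):
--         succ.setdefault(prev, []).append(nxt)
--
--     # Pass 2: count each successor list
--     return {prev: _count(nexts) for prev, nexts in succ.items()}
-- ===== Notes on version B (the rewrite author's own statement) =====
-- stated objective: alternative
-- what changed: Replaces A's single index loop that increments a nested dict-of-dicts with a two-pass decomposition: group each word's successors into lists over zip(words, words[1:]), then count each group with a small counting helper; the normalization prologue is written as one chained expression instead of A's loop over a punctuation list.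
import Mathlib
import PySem

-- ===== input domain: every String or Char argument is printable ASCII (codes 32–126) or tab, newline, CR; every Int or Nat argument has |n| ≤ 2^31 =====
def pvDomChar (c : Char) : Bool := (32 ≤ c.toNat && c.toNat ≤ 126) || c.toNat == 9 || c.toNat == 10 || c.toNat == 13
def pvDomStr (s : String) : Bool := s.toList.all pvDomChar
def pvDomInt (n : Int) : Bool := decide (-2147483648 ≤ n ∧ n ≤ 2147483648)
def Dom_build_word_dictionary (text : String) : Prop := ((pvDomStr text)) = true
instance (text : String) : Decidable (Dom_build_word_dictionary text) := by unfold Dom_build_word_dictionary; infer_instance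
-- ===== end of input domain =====

-- B replaces A's one-pass nested-dict counting loop by two passes — group successors per word, then count each
-- group with a counting helper — and writes the normalization as one chained expression (objective: alternative decomposition).

-- ===== PORT A =====
-- literal transliteration of A: normalization, split on ' ' (sep ≠ "", so split? is always some;
-- .getD [] is unreachable), then one index loop building a nested dict of counts.
def build_word_dictionary (text : String) : List (String × List (String × Int)) :=
  let text := PySem.Str.replace text "\n" " "
  let text := PySem.Str.replace text "\"" ""
  let text := PySem.Str.upper text
  let text := [",", ".", ",", ";", ":"].foldl
    (fun t symbol => PySem.Str.replace t symbol (" " ++ symbol ++ " ")) text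
  let words := (PySem.Str.split? text " ").getD []
  let words := words.filter (fun word => word != "")
  let word_dict := (PySem.List.pyRange 1 (words.length : Int) 1).foldl
    (fun word_dict i =>
      let prev := PySem.List.pyGetD words (i - 1) ""
      let cur := PySem.List.pyGetD words i ""
      let word_dict := if ¬ word_dict.contains prev then word_dict.insert prev PySem.Dict.empty else word_dict
      let inner := word_dict.getD prev PySem.Dict.empty
      let inner := if ¬ inner.contains cur then inner.insert cur 0 else inner
      word_dict.insert prev (inner.insert cur (inner.getD cur 0 + 1)))
    (PySem.Dict.empty : PySem.Dict String (PySem.Dict String Int))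
  word_dict.items.map (fun p => (p.1, p.2.items))

-- ===== PORT B =====
-- B's helper _count: manual counting loop (counts[x] = counts.get(x, 0) + 1)
def pvCount (xs : List String) : PySem.Dict String Int :=
  xs.foldl (fun counts x => counts.insert x (counts.getD x 0 + 1)) PySem.Dict.empty

-- literal transliteration of B: chained replaces, split/filter, grouping pass
-- (setdefault(prev, []).append(nxt) = modify with default []), then the dict
-- comprehension {prev: _count(nexts) …}; succ's keys are distinct, so the
-- comprehension's items are exactly this map over succ.items.
def build_word_dictionary_alt (text : String) : List (String × List (String × Int)) :=
  let cleaned :=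
    PySem.Str.replace (PySem.Str.replace (PySem.Str.replace (PySem.Str.replace
      (PySem.Str.replace (PySem.Str.upper (PySem.Str.replace
        (PySem.Str.replace text "\n" " ") "\"" "")) "," " , ") "." " . ")
      "," " , ") ";" " ; ") ":" " : "
  let words := ((PySem.Str.split? cleaned " ").getD []).filter (fun w => w != "")
  let succ := (words.zip (PySem.List.slice words (some 1) none)).foldl
    (fun d p => d.modify p.1 [] (fun l => l ++ [p.2]))
    (PySem.Dict.empty : PySem.Dict String (List String))
  succ.items.map (fun p => (p.1, (pvCount p.2).items))

-- ===== PRECONDITION & SPEC =====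
def Spec_build_word_dictionary (text : String) (out : List (String × List (String × Int))) : Prop := out = build_word_dictionary_alt text
instance (text : String) (out : List (String × List (String × Int))) : Decidable (Spec_build_word_dictionary text out) := by unfold Spec_build_word_dictionary; infer_instance

-- ===== CLAIM (what is proved, stated in full; the proofs are below) =====
def Claim_equal_build_word_dictionary : Prop := ∀ (text : String), Dom_build_word_dictionary text → Spec_build_word_dictionary text (build_word_dictionary text)

-- ===== LEMMAS AND PROOFS =====

-- B's _count is collections.Counter (PySem lemma, definitional)
theorem pvCount_eq_counter (xs : List String) : pvCount xs = PySem.Dict.counter xs :=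
  PySem.Dict.foldl_insert_getD_add_one_eq_counter xs

-- A's loop body, as a function of the state and the (prev, cur) pair
def pvStepA (d : PySem.Dict String (PySem.Dict String Int)) (p : String × String) :
    PySem.Dict String (PySem.Dict String Int) :=
  let d := if ¬ d.contains p.1 then d.insert p.1 PySem.Dict.empty else d
  let inner := d.getD p.1 PySem.Dict.empty
  let inner := if ¬ inner.contains p.2 then inner.insert p.2 0 else inner
  d.insert p.1 (inner.insert p.2 (inner.getD p.2 0 + 1))

-- map Counter over the values of a grouping dict
def pvMapCnt (G : PySem.Dict String (List String)) : PySem.Dict String (PySem.Dict String Int) :=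
  PySem.Dict.mk (G.items.map (fun p => (p.1, PySem.Dict.counter p.2)))

theorem pvContains_mapCnt (G : PySem.Dict String (List String)) (k : String) :
    (pvMapCnt G).contains k = G.contains k := by
  simp [pvMapCnt, PySem.Dict.contains, List.any_map, Function.comp_def]

theorem pvKeys_mapCnt (G : PySem.Dict String (List String)) :
    (pvMapCnt G).keys = G.keys := by
  simp [pvMapCnt, PySem.Dict.keys, List.map_map, Function.comp]

theorem pvMapCnt_insert (G : PySem.Dict String (List String)) (k : String) (v : List String) :
    pvMapCnt (G.insert k v) = (pvMapCnt G).insert k (PySem.Dict.counter v) := by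
  apply PySem.Dict.ext
  show (pvMapCnt (G.insert k v)).items = _
  rw [PySem.Dict.items_insert, pvContains_mapCnt]
  unfold pvMapCnt
  rw [PySem.Dict.items_insert]
  by_cases hc : G.contains k = true
  · simp only [hc, if_pos, List.map_map]
    apply List.map_congr_left
    intro p _
    by_cases hk : (p.1 == k) = true <;> simp [hk, Function.comp]
  · simp [hc]

theorem pvGetD_mapCnt (G : PySem.Dict String (List String)) (k : String)
    (hnd : G.keys.Nodup) :
    (pvMapCnt G).getD k PySem.Dict.empty = PySem.Dict.counter (G.getD k []) := by
  by_cases hc : G.contains k = true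
  · obtain ⟨v, hpv⟩ : ∃ v, (k, v) ∈ G.items := by
      simpa [PySem.Dict.keys] using (PySem.Dict.contains_iff_mem_keys G k).mp hc
    have h1 : G.getD k [] = v := PySem.Dict.getD_of_mem_items G hpv hnd []
    have h2 : (k, PySem.Dict.counter v) ∈ (pvMapCnt G).items := by
      unfold pvMapCnt
      exact List.mem_map.mpr ⟨(k, v), hpv, rfl⟩
    rw [h1, PySem.Dict.getD_of_mem_items _ h2 (by rw [pvKeys_mapCnt]; exact hnd)]
  · rw [PySem.Dict.getD_of_not_contains _ _ (by rw [pvContains_mapCnt]; exact eq_false_of_ne_true hc),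
        PySem.Dict.getD_of_not_contains _ _ (eq_false_of_ne_true hc)]
    rfl

-- A's inner two steps on a Counter state produce the Counter of the extended list
theorem pvInner_counter (ms : List String) (b : String) :
    (let inner := PySem.Dict.counter ms
     let inner := if ¬ inner.contains b then inner.insert b 0 else inner
     inner.insert b (inner.getD b 0 + 1)) = PySem.Dict.counter (ms ++ [b]) := by
  rw [PySem.Dict.counter_append_singleton]
  show _ = (PySem.Dict.counter ms).insert b ((PySem.Dict.counter ms).getD b 0 + 1)
  by_cases hc : (PySem.Dict.counter ms).contains b = true
  · simp [hc]
  · simp only [eq_false_of_ne_true hc, Bool.false_eq_true, not_false_iff, if_pos]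
    rw [PySem.Dict.insert_insert_self, PySem.Dict.getD_insert_self,
        PySem.Dict.getD_of_not_contains _ _ (eq_false_of_ne_true hc)]

theorem pvStepA_mapCnt (G : PySem.Dict String (List String)) (p : String × String)
    (hnd : G.keys.Nodup) :
    pvStepA (pvMapCnt G) p = pvMapCnt (G.insert p.1 (G.getD p.1 [] ++ [p.2])) := by
  obtain ⟨a, b⟩ := p
  unfold pvStepA
  simp only [pvContains_mapCnt]
  by_cases hc : G.contains a = true
  · simp only [hc, not_true, ite_false]
    rw [pvGetD_mapCnt G a hnd, pvInner_counter, pvMapCnt_insert]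
  · have hcf : G.contains a = false := eq_false_of_ne_true hc
    simp only [hcf, Bool.false_eq_true, not_false_iff, if_pos]
    rw [show (pvMapCnt G).insert a PySem.Dict.empty = pvMapCnt (G.insert a []) from
          (pvMapCnt_insert G a []).symm,
        pvGetD_mapCnt (G.insert a []) a (PySem.Dict.nodup_keys_insert G a [] hnd),
        PySem.Dict.getD_insert_self, pvInner_counter, pvMapCnt_insert,
        pvMapCnt_insert, PySem.Dict.insert_insert_self,
        PySem.Dict.getD_of_not_contains _ _ hcf]

-- the grouping loop's body is an insert
theorem pvStepG_eq (G : PySem.Dict String (List String)) (p : String × String) :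
    G.modify p.1 [] (fun l => l ++ [p.2]) = G.insert p.1 (G.getD p.1 [] ++ [p.2]) := rfl

theorem pvFold_eq (ps : List (String × String)) :
    ∀ (G : PySem.Dict String (List String)), G.keys.Nodup →
      ps.foldl pvStepA (pvMapCnt G) =
        pvMapCnt (ps.foldl (fun d p => d.modify p.1 [] (fun l => l ++ [p.2])) G) := by
  induction ps with
  | nil => intro G _; rfl
  | cons p ps ih =>
    intro G hnd
    simp only [List.foldl_cons, pvStepG_eq]
    rw [pvStepA_mapCnt G p hnd]
    exact ih _ (PySem.Dict.nodup_keys_insert G p.1 _ hnd)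

-- the index loop over range(1, len(words)) is the fold over consecutive pairs
theorem pvIdxFold {β : Type} (ws : List String) (g : β → String × String → β) :
    ∀ (n k : Nat) (d : β), ws.length - k = n →
      (PySem.List.pyRange ((k : Int) + 1) (ws.length : Int) 1).foldl
          (fun acc i => g acc (PySem.List.pyGetD ws (i - 1) "", PySem.List.pyGetD ws i "")) d
        = ((ws.drop k).zip (ws.drop (k + 1))).foldl g d := by
  intro n
  induction n with
  | zero =>
    intro k d h
    have hk : ws.length ≤ k := by omega
    rw [PySem.List.pyRange_one_eq_nil (by exact_mod_cast by omega),
        List.drop_eq_nil_of_le (show ws.length ≤ k + 1 by omega), List.zip_nil_right]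
    rfl
  | succ n ih =>
    intro k d h
    by_cases hlt : k + 1 < ws.length
    · have h1 : ((k : Int) + 1) < (ws.length : Int) := by exact_mod_cast hlt
      rw [PySem.List.pyRange_one_cons h1, List.foldl_cons]
      have hg1 : PySem.List.pyGetD ws ((k : Int) + 1 - 1) "" = ws[k]'(by omega) := by
        rw [show (k : Int) + 1 - 1 = (k : Int) by ring]
        rw [PySem.List.pyGetD_eq_getElem ws "" (by positivity) (by exact_mod_cast by omega)]
        simp
      have hg2 : PySem.List.pyGetD ws ((k : Int) + 1) "" = ws[k + 1]'hlt := by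
        rw [show (k : Int) + 1 = ((k + 1 : Nat) : Int) by push_cast; ring]
        rw [PySem.List.pyGetD_eq_getElem ws "" (by positivity) (by exact_mod_cast hlt)]
        simp
      have hz : (ws.drop k).zip (ws.drop (k + 1))
          = (ws[k]'(by omega), ws[k + 1]'hlt) :: ((ws.drop (k + 1)).zip (ws.drop (k + 2))) := by
        rw [List.drop_eq_getElem_cons (show k < ws.length by omega),
            List.drop_eq_getElem_cons hlt, List.zip_cons_cons]
      rw [hg1, hg2, hz, List.foldl_cons,
          show ((k : Int) + 1) + 1 = ((k + 1 : Nat) : Int) + 1 by push_cast; ring]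
      exact ih (k + 1) _ (by omega)
    · have hk : ws.length ≤ k + 1 := by omega
      rw [PySem.List.pyRange_one_eq_nil (by exact_mod_cast hk),
          List.drop_eq_nil_of_le hk, List.zip_nil_right]
      rfl

-- words[1:] is drop 1
theorem pvSlice_one (ws : List String) :
    PySem.List.slice ws (some 1) none = ws.drop 1 := by
  rw [PySem.List.slice_some_none]
  cases ws with
  | nil => rfl
  | cons a l => simp [PySem.List.clampIdx]

-- A's punctuation fold, unfolded, is B's chain of replaces
theorem pvPrologue_eq (t : String) :
    [",", ".", ",", ";", ":"].foldl
      (fun s symbol => PySem.Str.replace s symbol (" " ++ symbol ++ " ")) t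
    = PySem.Str.replace (PySem.Str.replace (PySem.Str.replace (PySem.Str.replace
        (PySem.Str.replace t "," " , ") "." " . ") "," " , ") ";" " ; ") ":" " : " := by
  simp only [List.foldl]
  rfl

-- ===== VERDICT (by name: the statement is the Claim_ definition above) =====
theorem build_word_dictionary_spec : Claim_equal_build_word_dictionary := by
  intro text _
  show build_word_dictionary text = build_word_dictionary_alt text
  unfold build_word_dictionary build_word_dictionary_alt
  simp only [pvSlice_one, pvPrologue_eq, pvCount_eq_counter]
  generalize (((PySem.Str.split? (PySem.Str.replace (PySem.Str.replace (PySem.Str.replace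
      (PySem.Str.replace (PySem.Str.replace (PySem.Str.upper (PySem.Str.replace
        (PySem.Str.replace text "\n" " ") "\"" "")) "," " , ") "." " . ")
      "," " , ") ";" " ; ") ":" " : ") " ").getD []).filter
      (fun word => word != "")) = ws
  have hidx := pvIdxFold ws (fun acc p => pvStepA acc p) (ws.length - 0) 0
    (PySem.Dict.empty : PySem.Dict String (PySem.Dict String Int)) rfl
  simp only [Nat.cast_zero, zero_add, List.drop_zero] at hidx
  have hfold := pvFold_eq (ws.zip (ws.drop 1)) PySem.Dict.empty (by simp [PySem.Dict.keys, PySem.Dict.empty])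
  have hA : (PySem.List.pyRange 1 (ws.length : Int) 1).foldl
      (fun word_dict i =>
        let prev := PySem.List.pyGetD ws (i - 1) ""
        let cur := PySem.List.pyGetD ws i ""
        let word_dict := if ¬ word_dict.contains prev then word_dict.insert prev PySem.Dict.empty else word_dict
        let inner := word_dict.getD prev PySem.Dict.empty
        let inner := if ¬ inner.contains cur then inner.insert cur 0 else inner
        word_dict.insert prev (inner.insert cur (inner.getD cur 0 + 1)))
      (PySem.Dict.empty : PySem.Dict String (PySem.Dict String Int))
      = pvMapCnt ((ws.zip (ws.drop 1)).foldl
          (fun d p => d.modify p.1 [] (fun l => l ++ [p.2])) PySem.Dict.empty) := by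
    rw [← hfold]
    exact hidx
  rw [hA]
  simp [pvMapCnt, List.map_map, Function.comp]
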